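-- pv_equiv track=rewrite | github.com/pauloBFalmeida/MeowRPGGame | meow.py | change_to_space
-- ===== SOURCE A (Python) =====
-- def change_to_space(line):
-- 	# change . to space
-- 	new_line = []
-- 	beggin = True
-- 	for l in line:
-- 		if l != "." and l != " ": beggin = False
-- 		if l == "." and beggin: l = " "
-- 		new_line.append(l)
-- 	return new_line
-- ===== SOURCE B (Python) =====
-- def change_to_space(line):
--     chars = list(line)
--     idx = len(chars)
--     for i, c in enumerate(chars):
--         if c != "." and c != " ":
--             idx = i
--             break
--     return [" " if c == "." else c for c in chars[:idx]] + chars[idx:]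
-- ===== Notes on version B (the rewrite author's own statement) =====
-- stated objective: alternative
-- what changed: Replaces A's single flag-carrying append loop with a locate-boundary-then-reshape decomposition: find the first character that is neither '.' nor ' ', map dots to spaces only in the prefix before it, and keep the suffix untouched.
import Mathlib
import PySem

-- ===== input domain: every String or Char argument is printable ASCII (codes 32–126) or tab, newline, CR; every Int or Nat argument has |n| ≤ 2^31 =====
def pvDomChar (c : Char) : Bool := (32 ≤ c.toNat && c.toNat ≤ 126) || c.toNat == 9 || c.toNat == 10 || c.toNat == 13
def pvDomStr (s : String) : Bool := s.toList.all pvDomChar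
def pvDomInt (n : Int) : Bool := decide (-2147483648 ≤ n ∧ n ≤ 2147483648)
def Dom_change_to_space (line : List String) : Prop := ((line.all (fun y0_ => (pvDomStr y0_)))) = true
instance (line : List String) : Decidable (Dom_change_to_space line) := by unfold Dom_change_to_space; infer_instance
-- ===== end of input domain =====

-- B replaces A's flag-carrying pass with a locate-boundary-then-reshape decomposition (alternative, same cost).

-- ===== PORT A =====
-- A: one pass with accumulator new_line and flag beggin; appends each (possibly converted) element.
def change_to_space (line : List String) : List String :=
  (line.foldl (fun (st : List String × Bool) l =>
    let beggin := if l ≠ "." ∧ l ≠ " " then false else st.2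
    let l' := if l = "." ∧ beggin then " " else l
    (st.1 ++ [l'], beggin)) ([], true)).1

-- ===== PORT B =====
-- B's boundary loop: index of the first element that is neither "." nor " " (default length).
def ctsBoundary : List String → Nat
  | [] => 0
  | c :: rest => if c ≠ "." ∧ c ≠ " " then 0 else 1 + ctsBoundary rest

def change_to_space_alt (line : List String) : List String :=
  let idx := ctsBoundary line
  (line.take idx).map (fun c => if c = "." then " " else c) ++ line.drop idx

-- ===== PRECONDITION & SPEC =====
def Spec_change_to_space (line : List String) (out : List String) : Prop := out = change_to_space_alt line
instance (line : List String) (out : List String) : Decidable (Spec_change_to_space line out) := by unfold Spec_change_to_space; infer_instance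

-- ===== CLAIM (what is proved, stated in full; the proofs are below) =====
def Claim_equal_change_to_space : Prop := ∀ (line : List String), Dom_change_to_space line → Spec_change_to_space line (change_to_space line)

-- ===== LEMMAS AND PROOFS =====
-- Once the flag is false, A copies the remaining elements unchanged.
theorem cts_foldl_false (line acc : List String) :
    (line.foldl (fun (st : List String × Bool) l =>
      let beggin := if l ≠ "." ∧ l ≠ " " then false else st.2
      let l' := if l = "." ∧ beggin then " " else l
      (st.1 ++ [l'], beggin)) (acc, false)) = (acc ++ line, false) := by
  induction line generalizing acc with
  | nil => simp
  | cons l rest ih =>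
    simp only [List.foldl_cons]
    have h1 : (if l ≠ "." ∧ l ≠ " " then false else false) = false := by split <;> rfl
    simp only [h1, ih]
    simp

-- With the flag still true, A's result is acc ++ B's reshape of the rest.
theorem cts_foldl_true (line acc : List String) :
    (line.foldl (fun (st : List String × Bool) l =>
      let beggin := if l ≠ "." ∧ l ≠ " " then false else st.2
      let l' := if l = "." ∧ beggin then " " else l
      (st.1 ++ [l'], beggin)) (acc, true)).1 = acc ++ change_to_space_alt line := by
  induction line generalizing acc with
  | nil => simp [change_to_space_alt, ctsBoundary]
  | cons l rest ih =>
    simp only [List.foldl_cons]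
    by_cases h : l ≠ "." ∧ l ≠ " "
    · have := cts_foldl_false rest (acc ++ [l])
      simp only [if_pos h] at *
      simp only [Bool.false_eq_true, and_false, if_false, this]
      simp [change_to_space_alt, ctsBoundary, if_pos h]
    · simp only [if_neg h, and_true]
      rw [ih (acc ++ [if l = "." then " " else l])]
      simp only [change_to_space_alt, ctsBoundary, if_neg h, Nat.add_comm 1,
        List.map_cons, List.take_succ_cons, List.drop_succ_cons]
      simp [List.append_assoc]

-- ===== VERDICT (by name: the statement is the Claim_ definition above) =====
theorem change_to_space_spec : Claim_equal_change_to_space := by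
  intro line _
  unfold Spec_change_to_space change_to_space
  simpa using cts_foldl_true line []
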